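-- pv_equiv track=rewrite | github.com/Krzysztofr1/Informatyka | zad60/zad603.py | znajdz_najwieksza_wzglednie_pierwsza
-- ===== SOURCE A (Python) =====
-- def nwd(x, y):
--     while y != 0:
--         x, y = y, x % y
--     return x
--
-- def znajdz_najwieksza_wzglednie_pierwsza(liczby):
--     najwieksza = 0
--     for i in range(len(liczby)):
--         for j in range(len(liczby)):
--             if i != j and nwd(liczby[i], liczby[j]) > 1:
--                 break
--         else:
--             if liczby[i] > najwieksza:
--                 najwieksza = liczby[i]
--     return najwieksza
-- ===== SOURCE B (Python) =====
-- def znajdz_najwieksza_wzglednie_pierwsza(liczby):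
--     best = 1 if 1 in liczby else 0
--     if 0 in liczby:
--         return best
--     iloczyn = 1
--     for x in liczby:
--         if x > 1:
--             iloczyn *= x
--     for x in liczby:
--         if x > best:
--             a, b = x, iloczyn // x
--             while b != 0:
--                 a, b = b, a % b
--             if a == 1:
--                 best = x
--     return best
-- ===== Notes on version B (the rewrite author's own statement) =====
-- stated objective: faster
-- what changed: Instead of testing each element against every other with an inner gcd loop (all pairs), B multiplies all elements > 1 into one product P and tests each element x with a single gcd(x, P//x); zeros and the element 1 are handled up front.
import Mathlib
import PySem

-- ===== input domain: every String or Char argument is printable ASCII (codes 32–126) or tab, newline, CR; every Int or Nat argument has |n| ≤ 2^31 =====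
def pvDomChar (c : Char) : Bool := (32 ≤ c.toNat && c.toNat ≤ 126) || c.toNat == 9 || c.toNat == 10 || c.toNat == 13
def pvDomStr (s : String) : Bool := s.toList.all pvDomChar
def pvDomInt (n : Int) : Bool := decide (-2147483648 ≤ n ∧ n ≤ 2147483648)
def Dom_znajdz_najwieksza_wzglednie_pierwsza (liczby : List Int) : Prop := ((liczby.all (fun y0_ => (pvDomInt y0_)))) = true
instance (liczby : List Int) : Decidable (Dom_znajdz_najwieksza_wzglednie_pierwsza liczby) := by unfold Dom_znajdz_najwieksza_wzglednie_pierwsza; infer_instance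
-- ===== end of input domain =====

-- B replaces A's all-pairs gcd scan by a single product of all elements > 1 plus one gcd per
-- element against that product; same return value, measured constant-factor speed-up.

-- needed by the termination proofs of both ports (cited by name in decreasing_by)
theorem pvModAbsLt (x y : Int) (hy : y ≠ 0) : (PySem.Int.mod x y).natAbs < y.natAbs := by
  rcases lt_or_gt_of_ne hy with h | h
  · have := PySem.Int.mod_neg_bounds x h
    omega
  · have h1 := PySem.Int.mod_nonneg x h
    have h2 := PySem.Int.mod_lt x h
    omega

-- ===== PORT A =====
def nwd (x y : Int) : Int :=
  if hy : y = 0 then x else nwd y (PySem.Int.mod x y)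
termination_by y.natAbs
decreasing_by exact pvModAbsLt x y hy

def znajdz_najwieksza_wzglednie_pierwsza (liczby : List Int) : Int :=
  (PySem.List.pyRange 0 liczby.length 1).foldl
    (fun najwieksza i =>
      if (PySem.List.pyRange 0 liczby.length 1).any
           (fun j => decide (i ≠ j) &&
             decide (nwd (PySem.List.pyGetD liczby i 0) (PySem.List.pyGetD liczby j 0) > 1))
      then najwieksza
      else if PySem.List.pyGetD liczby i 0 > najwieksza then PySem.List.pyGetD liczby i 0
            else najwieksza)
    0

-- ===== PORT B =====
-- the inline 'while b != 0: a, b = b, a % b' loop of Source B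
def pvGcdLoop (a b : Int) : Int :=
  if hb : b = 0 then a else pvGcdLoop b (PySem.Int.mod a b)
termination_by b.natAbs
decreasing_by exact pvModAbsLt a b hb

def znajdz_najwieksza_wzglednie_pierwsza_alt (liczby : List Int) : Int :=
  let best : Int := if liczby.contains 1 then 1 else 0
  if liczby.contains 0 then best
  else
    let iloczyn : Int := liczby.foldl (fun p x => if x > 1 then p * x else p) 1
    liczby.foldl
      (fun best x =>
        if x > best then
          if pvGcdLoop x (PySem.Int.floordiv iloczyn x) = 1 then x else best
        else best)
      best

-- ===== PRECONDITION & SPEC =====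
def Spec_znajdz_najwieksza_wzglednie_pierwsza (liczby : List Int) (out : Int) : Prop := out = znajdz_najwieksza_wzglednie_pierwsza_alt liczby
instance (liczby : List Int) (out : Int) : Decidable (Spec_znajdz_najwieksza_wzglednie_pierwsza liczby out) := by unfold Spec_znajdz_najwieksza_wzglednie_pierwsza; infer_instance

-- ===== CLAIM (what is proved, stated in full; the proofs are below) =====
def Claim_equal_znajdz_najwieksza_wzglednie_pierwsza : Prop := ∀ (liczby : List Int), Dom_znajdz_najwieksza_wzglednie_pierwsza liczby → Spec_znajdz_najwieksza_wzglednie_pierwsza liczby (znajdz_najwieksza_wzglednie_pierwsza liczby)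

-- ===== LEMMAS AND PROOFS =====

-- the positive elements > 1 of the list (the ones B multiplies into the product)
def pvF (l : List Int) : List Int := l.filter (fun y => decide ((1:Int) < y))

-- value-level qualification: the condition under which an element updates the running maximum
def pvQ (l : List Int) (x : Int) : Bool :=
  (x == 1) || (decide (1 < x) && !(decide ((0:Int) ∈ l)) &&
               (Int.gcd x ((pvF l).erase x).prod == 1))

def pvStep (l : List Int) (acc x : Int) : Int :=
  if x > acc then (if pvQ l x then x else acc) else acc

-- A's inner loop (the for-j/break) as a predicate on the index
def pvBrk (l : List Int) (i : Int) : Bool :=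
  (PySem.List.pyRange 0 l.length 1).any
    (fun j => decide (i ≠ j) &&
      decide (nwd (PySem.List.pyGetD l i 0) (PySem.List.pyGetD l j 0) > 1))

theorem nwd_zero (x : Int) : nwd x 0 = x := by
  unfold nwd; simp

theorem nwd_eq_sign_gcd : ∀ (n : Nat) (x y : Int), y.natAbs = n → y ≠ 0 →
    nwd x y = y.sign * Int.gcd x y := by
  intro n
  induction n using Nat.strong_induction_on with
  | _ n ih =>
    intro x y hn hy
    rw [nwd, dif_neg hy]
    have hqr : PySem.Int.mod x y = x - PySem.Int.floordiv x y * y := by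
      have h := PySem.Int.floordiv_mul_add_mod x y
      linarith
    have hgcd : Int.gcd y (PySem.Int.mod x y) = Int.gcd x y := by
      rw [hqr, Int.gcd_sub_mul_right_right, Int.gcd_comm]
    by_cases hr0 : PySem.Int.mod x y = 0
    · rw [hr0, nwd_zero]
      have hdvd : y ∣ x := (PySem.Int.mod_eq_zero_iff_dvd x y).mp hr0
      have hg : Int.gcd x y = y.natAbs := Nat.gcd_eq_right (Int.natAbs_dvd_natAbs.mpr hdvd)
      rw [hg]
      exact (Int.sign_mul_natAbs y).symm
    · have hlt : (PySem.Int.mod x y).natAbs < n := hn ▸ pvModAbsLt x y hy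
      rw [ih _ hlt y (PySem.Int.mod x y) rfl hr0, hgcd]
      congr 1
      rcases lt_or_gt_of_ne hy with h | h
      · have hb := PySem.Int.mod_neg_bounds x h
        have : PySem.Int.mod x y < 0 := by omega
        rw [Int.sign_eq_neg_one_of_neg this, Int.sign_eq_neg_one_of_neg h]
      · have h1 := PySem.Int.mod_nonneg x h
        have : 0 < PySem.Int.mod x y := by omega
        rw [Int.sign_eq_one_of_pos this, Int.sign_eq_one_of_pos h]

theorem nwd_gt_one (x y : Int) :
    1 < nwd x y ↔ (0 < y ∧ 1 < Int.gcd x y) ∨ (y = 0 ∧ 1 < x) := by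
  by_cases hy : y = 0
  · subst hy; rw [nwd_zero]; simp
  · rw [nwd_eq_sign_gcd y.natAbs x y rfl hy]
    rcases lt_or_gt_of_ne hy with h | h
    · rw [Int.sign_eq_neg_one_of_neg h]
      constructor
      · intro hc; exfalso
        have : (0:Int) ≤ (Int.gcd x y : Int) := Int.natCast_nonneg _
        omega
      · rintro (⟨h0, _⟩ | ⟨h0, _⟩) <;> omega
    · rw [Int.sign_eq_one_of_pos h]
      constructor
      · intro hc; left; exact ⟨h, by exact_mod_cast (by linarith : (1:Int) < (Int.gcd x y : Int))⟩
      · rintro (⟨_, hg⟩ | ⟨h0, _⟩)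
        · have : (1:Int) < (Int.gcd x y : Int) := by exact_mod_cast hg
          linarith
        · omega

theorem pvGcdLoop_eq_nwd : ∀ (n : Nat) (a b : Int), b.natAbs = n → pvGcdLoop a b = nwd a b := by
  intro n
  induction n using Nat.strong_induction_on with
  | _ n ih =>
    intro a b hn
    rw [pvGcdLoop, nwd]
    by_cases hb : b = 0
    · simp [hb]
    · rw [dif_neg hb, dif_neg hb]
      exact ih _ (hn ▸ pvModAbsLt a b hb) b (PySem.Int.mod a b) rfl

-- fold congruence under an accumulator invariant (specific to the Int accumulators here)
theorem pvFoldlCongr {α : Type} (P : Int → Prop) (f g : Int → α → Int) :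
    ∀ (l : List α) (init : Int), P init →
    (∀ acc a, a ∈ l → P acc → f acc a = g acc a) →
    (∀ acc a, a ∈ l → P acc → P (g acc a)) →
    l.foldl f init = l.foldl g init := by
  intro l
  induction l with
  | nil => intro init _ _ _; rfl
  | cons x t ih =>
    intro init hP hfg hPg
    simp only [List.foldl_cons]
    rw [hfg init x (by simp) hP]
    exact ih _ (hPg init x (by simp) hP)
      (fun acc a ha => hfg acc a (by simp [ha]))
      (fun acc a ha => hPg acc a (by simp [ha]))

theorem pvBrk_iff (l : List Int) (i : Nat) (hi : i < l.length) :
    pvBrk l (i : Int) = true ↔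
      ∃ y ∈ l.eraseIdx i, (0 < y ∧ 1 < Int.gcd l[i] y) ∨ (y = 0 ∧ 1 < l[i]) := by
  have hgeti : PySem.List.pyGetD l (i : Int) 0 = l[i] := by
    rw [PySem.List.pyGetD_eq_getElem l 0 (Int.natCast_nonneg i) (by exact_mod_cast hi)]
    simp
  unfold pvBrk
  rw [List.any_eq_true]
  constructor
  · rintro ⟨j, hj, hcond⟩
    rw [PySem.List.mem_pyRange_one] at hj
    obtain ⟨hj0, hjlen⟩ := hj
    simp only [Bool.and_eq_true, decide_eq_true_eq] at hcond
    obtain ⟨hne, hnwd⟩ := hcond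
    rw [hgeti, PySem.List.pyGetD_eq_getElem l 0 hj0 hjlen] at hnwd
    refine ⟨l[j.toNat]'(by omega), ?_, (nwd_gt_one _ _).mp hnwd⟩
    rw [List.mem_eraseIdx_iff_getElem]
    exact ⟨j.toNat, by omega, by omega, rfl⟩
  · rintro ⟨y, hy, hcase⟩
    rw [List.mem_eraseIdx_iff_getElem] at hy
    obtain ⟨j, hjlen, hji, hjy⟩ := hy
    subst hjy
    refine ⟨(j : Int), ?_, ?_⟩
    · rw [PySem.List.mem_pyRange_one]
      exact ⟨Int.natCast_nonneg j, by exact_mod_cast hjlen⟩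
    · simp only [Bool.and_eq_true, decide_eq_true_eq]
      refine ⟨fun h => hji (by omega), ?_⟩
      rw [hgeti, PySem.List.pyGetD_eq_getElem l 0 (Int.natCast_nonneg j) (by exact_mod_cast hjlen)]
      simp only [Int.toNat_natCast]
      exact (nwd_gt_one _ _).mpr hcase

theorem pvPermFilterErase (l : List Int) (i : Nat) (hi : i < l.length) (h1 : (1:Int) < l[i]) :
    ((pvF l).erase l[i]).Perm (pvF (l.eraseIdx i)) := by
  have hperm : (l[i] :: l.eraseIdx i).Perm l := List.getElem_cons_eraseIdx_perm hi
  have hf : (pvF l).Perm (pvF (l[i] :: l.eraseIdx i)) := ((hperm.filter _).symm)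
  have hcons : pvF (l[i] :: l.eraseIdx i) = l[i] :: pvF (l.eraseIdx i) := by
    unfold pvF
    exact List.filter_cons_of_pos (by simpa using h1)
  rw [hcons] at hf
  have := hf.erase l[i]
  simpa [List.erase_cons_head] using this

theorem pvGcdProdOne (x : Int) (hx : x ≠ 0) :
    ∀ (L : List Int), Int.gcd x L.prod = 1 ↔ ∀ y ∈ L, Int.gcd x y = 1 := by
  intro L
  induction L with
  | nil => simp
  | cons y t ih =>
    simp only [List.prod_cons, List.mem_cons]
    have hsplit : Int.gcd x (y * t.prod) = 1 ↔ Int.gcd x y = 1 ∧ Int.gcd x t.prod = 1 := by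
      show Nat.Coprime _ _ ↔ _
      unfold Int.gcd
      rw [Int.natAbs_mul]
      exact Nat.coprime_mul_iff_right
    rw [hsplit, ih]
    constructor
    · rintro ⟨h1, h2⟩ z (rfl | hz)
      · exact h1
      · exact h2 z hz
    · intro h
      exact ⟨h y (Or.inl rfl), fun z hz => h z (Or.inr hz)⟩

theorem pvOneLeProd : ∀ (L : List Int), (∀ y ∈ L, (1:Int) ≤ y) → 1 ≤ L.prod := by
  intro L
  induction L with
  | nil => simp
  | cons y t ih =>
    intro h
    simp only [List.prod_cons]
    have hy := h y (by simp)
    have ht : (1:Int) ≤ t.prod := ih (fun z hz => h z (by simp [hz]))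
    nlinarith

theorem pvProdFold : ∀ (l : List Int) (p : Int),
    l.foldl (fun p x => if x > 1 then p * x else p) p = p * (pvF l).prod := by
  intro l
  induction l with
  | nil => intro p; simp [pvF]
  | cons x t ih =>
    intro p
    simp only [List.foldl_cons]
    unfold pvF
    by_cases h : (1:Int) < x
    · rw [List.filter_cons_of_pos (by simpa using h), if_pos h, ih]
      unfold pvF
      rw [List.prod_cons, mul_assoc]
    · rw [List.filter_cons_of_neg (by simpa using h), if_neg h, ih]
      rfl

theorem pvNotBrk_iff (l : List Int) (i : Nat) (hi : i < l.length) (hx : (1:Int) ≤ l[i]) :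
    (pvBrk l (i : Int) = false) ↔ pvQ l l[i] = true := by
  have hbrk := pvBrk_iff l i hi
  rcases eq_or_lt_of_le hx with h1 | h1
  · have hnot : ¬ (pvBrk l (i:Int) = true) := by
      rw [hbrk]
      rintro ⟨y, _, (⟨_, hg⟩ | ⟨_, hgt⟩)⟩
      · rw [← h1] at hg
        have : Int.gcd 1 y = 1 := by simp [Int.gcd]
        omega
      · omega
    rw [Bool.eq_false_iff]
    constructor
    · intro _
      simp [pvQ, ← h1]
    · intro _
      exact hnot
  · have hxne : l[i] ≠ 0 := by omega
    have hperm : (l[i] :: l.eraseIdx i).Perm l := List.getElem_cons_eraseIdx_perm hi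
    have hpermF := pvPermFilterErase l i hi h1
    have h0iff : ((0:Int) ∈ l.eraseIdx i) ↔ ((0:Int) ∈ l) := by
      constructor
      · intro h
        exact hperm.mem_iff.mp (List.mem_cons_of_mem _ h)
      · intro h
        rcases List.mem_cons.mp (hperm.mem_iff.mpr h) with h' | h'
        · exact absurd h'.symm hxne
        · exact h'
    have hmain : pvBrk l (i:Int) = true ↔
        ((0:Int) ∈ l) ∨ ¬ (Int.gcd l[i] ((pvF l).erase l[i]).prod = 1) := by
      rw [hbrk]
      constructor
      · rintro ⟨y, hy, (⟨hy0, hg⟩ | ⟨hy0, _⟩)⟩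
        · right
          rw [pvGcdProdOne _ hxne]
          push_neg
          have hy1 : (1:Int) < y := by
            by_contra hle
            have hye : y = 1 := by omega
            rw [hye] at hg
            have : Int.gcd l[i] 1 = 1 := by simp [Int.gcd]
            omega
          refine ⟨y, ?_, by omega⟩
          rw [hpermF.mem_iff]
          exact List.mem_filter.mpr ⟨hy, by simpa using hy1⟩
        · left
          rw [← h0iff]
          rw [hy0] at hy
          exact hy
      · rintro (h0 | hg)
        · exact ⟨0, h0iff.mpr h0, Or.inr ⟨rfl, h1⟩⟩
        · rw [pvGcdProdOne _ hxne] at hg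
          push_neg at hg
          obtain ⟨y, hy, hgy⟩ := hg
          have hyF : y ∈ pvF (l.eraseIdx i) := hpermF.mem_iff.mp hy
          have hmemf := List.mem_filter.mp hyF
          have hy1 : (1:Int) < y := by simpa using hmemf.2
          refine ⟨y, hmemf.1, Or.inl ⟨by omega, ?_⟩⟩
          have hgne : Int.gcd l[i] y ≠ 0 := by
            rw [Ne, Int.gcd_eq_zero_iff]
            rintro ⟨h, _⟩
            exact hxne h
          omega
    have hQ : pvQ l l[i] = true ↔
        (¬ ((0:Int) ∈ l) ∧ Int.gcd l[i] ((pvF l).erase l[i]).prod = 1) := by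
      unfold pvQ
      have hne1 : (l[i] == (1:Int)) = false := by
        simp only [beq_eq_false_iff_ne, Ne]
        omega
      simp [hne1, h1]
    rw [Bool.eq_false_iff, Ne, hmain, hQ]
    tauto

theorem pvA_eq_foldl (l : List Int) :
    znajdz_najwieksza_wzglednie_pierwsza l = l.foldl (pvStep l) 0 := by
  have hcongr :
      (PySem.List.pyRange 0 l.length 1).foldl
        (fun naj i => if pvBrk l i then naj
          else if PySem.List.pyGetD l i 0 > naj then PySem.List.pyGetD l i 0 else naj) 0
      = (PySem.List.pyRange 0 l.length 1).foldl
          (fun acc i => pvStep l acc (PySem.List.pyGetD l i 0)) 0 := by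
    apply pvFoldlCongr (fun acc => 0 ≤ acc)
    · exact le_rfl
    · intro acc i hmem hacc
      rw [PySem.List.mem_pyRange_one] at hmem
      obtain ⟨h0i, hilen⟩ := hmem
      rw [PySem.List.pyGetD_eq_getElem l 0 h0i hilen]
      by_cases hx1 : (1:Int) ≤ l[i.toNat]
      · have hnb := pvNotBrk_iff l i.toNat (by omega) hx1
        rw [show ((i.toNat : Nat) : Int) = i by omega] at hnb
        unfold pvStep
        cases hb : pvBrk l i with
        | true =>
          have hq : pvQ l (l[i.toNat]'(by omega)) = false := by
            cases hqv : pvQ l (l[i.toNat]'(by omega)) with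
            | false => rfl
            | true =>
              rw [hnb.mpr hqv] at hb
              cases hb
          rw [hq]
          simp
        | false =>
          have hq : pvQ l (l[i.toNat]'(by omega)) = true := hnb.mp hb
          rw [hq]
          simp
      · have hng : ¬ (l[i.toNat]'(by omega) > acc) := by omega
        unfold pvStep
        rw [if_neg hng, if_neg hng]
        simp
    · intro acc i _ hacc
      unfold pvStep
      split_ifs <;> omega
  have h2 := PySem.List.foldl_pyRange_zero_pyGetD l 0 (pvStep l) 0
  exact hcongr.trans h2

theorem pvStep_ge (l : List Int) (acc x : Int) : acc ≤ pvStep l acc x := by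
  unfold pvStep
  split_ifs <;> omega

theorem pvFoldl_ge (l t : List Int) : ∀ (s : Int), s ≤ t.foldl (pvStep l) s := by
  induction t with
  | nil => intro s; simp
  | cons x t ih =>
    intro s
    simp only [List.foldl_cons]
    exact le_trans (pvStep_ge l s x) (ih _)

theorem pvFoldl_max (l : List Int) : ∀ (t : List Int) (s : Int), 0 ≤ s →
    t.foldl (pvStep l) s = max s (t.foldl (pvStep l) 0) := by
  intro t
  induction t with
  | nil => intro s hs; simp; omega
  | cons x t ih =>
    intro s hs
    simp only [List.foldl_cons]
    have h0x : 0 ≤ pvStep l 0 x := by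
      unfold pvStep; split_ifs <;> omega
    have hstep : pvStep l s x = max s (pvStep l 0 x) := by
      unfold pvStep; split_ifs <;> omega
    rw [hstep, ih _ (by omega), ih _ h0x]
    omega

theorem pvFoldl_one_mem (l : List Int) : ∀ (t : List Int) (s : Int), 0 ≤ s → (1:Int) ∈ t →
    1 ≤ t.foldl (pvStep l) s := by
  intro t
  induction t with
  | nil => intro s _ h; cases h
  | cons x t ih =>
    intro s hs hmem
    simp only [List.foldl_cons]
    by_cases hx1 : x = (1:Int)
    · subst hx1
      have hq : pvQ l 1 = true := by simp [pvQ]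
      by_cases hgt : (1:Int) > s
      · have : pvStep l s 1 = 1 := by unfold pvStep; rw [if_pos hgt, if_pos hq]
        rw [this]
        exact le_trans le_rfl (pvFoldl_ge l t 1)
      · have : pvStep l s 1 = s := by unfold pvStep; rw [if_neg hgt]
        rw [this]
        exact le_trans (by omega) (pvFoldl_ge l t s)
    · have hmem' : (1:Int) ∈ t := by
        rcases List.mem_cons.mp hmem with h | h
        · exact absurd h.symm hx1
        · exact h
      exact ih _ (le_trans hs (pvStep_ge l s x)) hmem'

theorem pvFold01 : ∀ (t : List Int) (acc : Int), (acc = 0 ∨ acc = 1) →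
    t.foldl (fun acc x => if x > acc then (if x == 1 then x else acc) else acc) acc
      = if (1:Int) ∈ t then 1 else acc := by
  intro t
  induction t with
  | nil => intro acc _; simp
  | cons x t ih =>
    intro acc hacc
    simp only [List.foldl_cons]
    by_cases hx1 : x = (1:Int)
    · subst hx1
      rcases hacc with rfl | rfl
      · simpa using ih 1 (Or.inr rfl)
      · simpa using ih 1 (Or.inr rfl)
    · have hstep : (if x > acc then (if x == 1 then x else acc) else acc) = acc := by
        by_cases h : x > acc <;> simp [h, hx1]
      rw [hstep, ih acc hacc]
      have : ((1:Int) ∈ x :: t) ↔ ((1:Int) ∈ t) := by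
        constructor
        · intro h
          rcases List.mem_cons.mp h with h' | h'
          · exact absurd h'.symm hx1
          · exact h'
        · exact List.mem_cons_of_mem x
      rw [if_congr this rfl rfl]

theorem pvAlt_eq (l : List Int) : znajdz_najwieksza_wzglednie_pierwsza_alt l =
    if (0:Int) ∈ l then (if (1:Int) ∈ l then 1 else 0)
    else l.foldl (fun best x => if x > best then
            if pvGcdLoop x (PySem.Int.floordiv ((pvF l).prod) x) = 1 then x else best
          else best) (if (1:Int) ∈ l then 1 else 0) := by
  unfold znajdz_najwieksza_wzglednie_pierwsza_alt
  have hprod : l.foldl (fun p x => if x > 1 then p * x else p) 1 = (pvF l).prod := by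
    rw [pvProdFold]
    ring
  simp only [List.contains_iff_mem, hprod]

theorem pvGcdLoop_prod (l : List Int) (x : Int) (hmem : x ∈ l) (hx : (1:Int) ≤ x) (h0 : (0:Int) ∉ l) :
    (pvGcdLoop x (PySem.Int.floordiv ((pvF l).prod) x) = 1) ↔ pvQ l x = true := by
  have hFpos : ∀ y ∈ pvF l, (1:Int) < y := by
    intro y hy
    have := (List.mem_filter.mp hy).2
    simpa using this
  rcases eq_or_lt_of_le hx with h1 | h1
  · -- x = 1
    have hP : (1:Int) ≤ (pvF l).prod := pvOneLeProd _ (fun y hy => le_of_lt (hFpos y hy))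
    have hdiv : PySem.Int.floordiv ((pvF l).prod) x = (pvF l).prod := by
      rw [← h1, PySem.Int.floordiv_eq_ediv_of_pos (by omega : (0:Int) < 1), Int.ediv_one]
    rw [hdiv, pvGcdLoop_eq_nwd ((pvF l).prod).natAbs _ _ rfl,
        nwd_eq_sign_gcd ((pvF l).prod).natAbs _ _ rfl (by omega),
        Int.sign_eq_one_of_pos (by omega), ← h1]
    have hg : Int.gcd 1 ((pvF l).prod) = 1 := by simp [Int.gcd]
    rw [hg]
    simp [pvQ]
  · -- 1 < x
    have hxF : x ∈ pvF l := List.mem_filter.mpr ⟨hmem, by simpa using h1⟩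
    have hprodx : x * ((pvF l).erase x).prod = (pvF l).prod := List.prod_erase hxF
    have hR : (1:Int) ≤ ((pvF l).erase x).prod := by
      apply pvOneLeProd
      intro y hy
      exact le_of_lt (hFpos y (List.mem_of_mem_erase hy))
    have hdiv : PySem.Int.floordiv ((pvF l).prod) x = ((pvF l).erase x).prod := by
      rw [PySem.Int.floordiv_eq_ediv_of_pos (by omega : (0:Int) < x), ← hprodx]
      exact Int.mul_ediv_cancel_left _ (by omega)
    rw [hdiv, pvGcdLoop_eq_nwd (((pvF l).erase x).prod).natAbs _ _ rfl,
        nwd_eq_sign_gcd (((pvF l).erase x).prod).natAbs _ _ rfl (by omega),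
        Int.sign_eq_one_of_pos (by omega)]
    have hne1 : (x == (1:Int)) = false := by
      simp only [beq_eq_false_iff_ne, Ne]
      omega
    unfold pvQ
    simp only [hne1, Bool.false_or, Bool.and_eq_true, Bool.not_eq_true', decide_eq_true_eq,
      decide_eq_false_iff_not, beq_iff_eq]
    constructor
    · intro h
      refine ⟨⟨h1, h0⟩, ?_⟩
      have : ((Int.gcd x (((pvF l).erase x).prod) : Int)) = 1 := by
        rw [← h]
        ring
      exact_mod_cast this
    · rintro ⟨_, hg⟩
      have : ((Int.gcd x (((pvF l).erase x).prod) : Int)) = 1 := by exact_mod_cast hg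
      rw [this]
      ring

theorem znajdz_spec_aux (l : List Int) :
    znajdz_najwieksza_wzglednie_pierwsza l = znajdz_najwieksza_wzglednie_pierwsza_alt l := by
  rw [pvA_eq_foldl, pvAlt_eq]
  by_cases h0 : (0:Int) ∈ l
  · rw [if_pos h0]
    have hstep : pvStep l = fun acc x => if x > acc then (if x == 1 then x else acc) else acc := by
      funext acc x
      unfold pvStep pvQ
      simp [h0]
    rw [hstep, pvFold01 l 0 (Or.inl rfl)]
  · rw [if_neg h0]
    have hbest0 : (0:Int) ≤ (if (1:Int) ∈ l then 1 else 0) := by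
      split_ifs <;> omega
    have hcongr :
        l.foldl (fun best x => if x > best then
            if pvGcdLoop x (PySem.Int.floordiv ((pvF l).prod) x) = 1 then x else best
          else best) (if (1:Int) ∈ l then 1 else 0)
        = l.foldl (pvStep l) (if (1:Int) ∈ l then 1 else 0) := by
      apply pvFoldlCongr (fun acc => 0 ≤ acc) _ _ l _ hbest0
      · intro acc x hmem hacc
        by_cases hgt : x > acc
        · have hx1 : (1:Int) ≤ x := by omega
          have hiff := pvGcdLoop_prod l x hmem hx1 h0
          unfold pvStep
          rw [if_pos hgt, if_pos hgt]
          by_cases hc : pvGcdLoop x (PySem.Int.floordiv ((pvF l).prod) x) = 1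
          · rw [if_pos hc, hiff.mp hc]
            simp
          · rw [if_neg hc]
            have hq : pvQ l x = false := by
              cases hqv : pvQ l x with
              | false => rfl
              | true => exact absurd (hiff.mpr hqv) hc
            rw [hq]
            simp
        · unfold pvStep
          rw [if_neg hgt, if_neg hgt]
      · intro acc x _ hacc
        unfold pvStep
        split_ifs <;> omega
    rw [hcongr, pvFoldl_max l l _ hbest0]
    have hle : (if (1:Int) ∈ l then 1 else 0 : Int) ≤ l.foldl (pvStep l) 0 := by
      by_cases h1 : (1:Int) ∈ l
      · rw [if_pos h1]
        exact pvFoldl_one_mem l l 0 le_rfl h1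
      · rw [if_neg h1]
        exact pvFoldl_ge l l 0
    omega

-- ===== VERDICT (by name: the statement is the Claim_ definition above) =====
theorem znajdz_najwieksza_wzglednie_pierwsza_spec : Claim_equal_znajdz_najwieksza_wzglednie_pierwsza := by
  intro liczby _
  show _ = _
  exact znajdz_spec_aux liczby
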